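-- pv_equiv track=rewrite | github.com/774799513/learngit | new.py | make_names
-- ===== SOURCE A (Python) =====
-- def make_names(n):
--     '''
--     Generate names for dataset columns
--     '''
--     names = []
--
--     counter = 0
--     drop_names = []
--
--     for i in range(n):
--         for j in range(n):
--             names.append('traffic_{}_{}'.format(i, j))
--             if i == j:
--                 drop_names.append(names[-1])
--             counter += 1
--             names.append('packets_{}_{}'.format(i, j))
--             if i == j:
--                 drop_names.append(names[-1])
--             counter += 1
--             names.append('drops_{}_{}'.format(i, j))
--             if i == j:
--                 drop_names.append(names[-1])
--             counter += 1
--     for i in range(n):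
--         for j in range(n):
--             for k in ['average', 'average_log', 'q10', 'q20', 'q50', 'q80', 'q90', 'variance']:
--                 names.append('{}_delay_{}_{}'.format(k, i, j))
--                 if i == j:
--                     drop_names.append(names[-1])
--                 counter += 1
--     names.append('empty')
--     return names, drop_names
-- ===== SOURCE B (Python) =====
-- METRICS = ['average', 'average_log', 'q10', 'q20', 'q50', 'q80', 'q90', 'variance']
--
--
-- def _base(i, j):
--     return ['traffic_{}_{}'.format(i, j), 'packets_{}_{}'.format(i, j),
--             'drops_{}_{}'.format(i, j)]
--
--
-- def _delays(i, j):
--     return ['{}_delay_{}_{}'.format(k, i, j) for k in METRICS]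
--
--
-- def make_names(n):
--     names = [s for i in range(n) for j in range(n) for s in _base(i, j)]
--     names += [s for i in range(n) for j in range(n) for s in _delays(i, j)]
--     names.append('empty')
--     drop_names = [s for i in range(n) for s in _base(i, i)]
--     drop_names += [s for i in range(n) for s in _delays(i, i)]
--     return names, drop_names
-- ===== Notes on version B (the rewrite author's own statement) =====
-- stated objective: simpler
-- what changed: B drops the i==j test (and the dead counter) from the name-building loops entirely: names come from plain comprehensions over all (i,j), and drop_names from two separate diagonal-only passes over i.
import Mathlib
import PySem

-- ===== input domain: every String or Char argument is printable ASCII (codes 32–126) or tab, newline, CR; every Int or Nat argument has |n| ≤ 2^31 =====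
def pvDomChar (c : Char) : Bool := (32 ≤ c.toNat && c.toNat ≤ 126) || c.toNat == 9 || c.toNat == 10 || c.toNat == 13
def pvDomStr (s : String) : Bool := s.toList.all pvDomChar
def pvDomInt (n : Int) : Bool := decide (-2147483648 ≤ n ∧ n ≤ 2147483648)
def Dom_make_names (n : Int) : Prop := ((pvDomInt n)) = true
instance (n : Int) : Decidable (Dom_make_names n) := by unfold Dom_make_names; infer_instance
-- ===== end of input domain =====

-- B removes the i==j test (and the dead counter) from the name-building loops:
-- names via plain double comprehensions, drop_names via two diagonal-only passes (simpler; same O(n^2) cost).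

-- ===== PORT A =====
def delayKeys : List String := ["average", "average_log", "q10", "q20", "q50", "q80", "q90", "variance"]

-- state = (names, counter, drop_names); one inner-loop body of A's first double loop
def mnStep1 (i j : Int) (st : List String × Int × List String) : List String × Int × List String :=
  let t := "traffic_" ++ PySem.Int.toStr i ++ "_" ++ PySem.Int.toStr j
  let st := (st.1 ++ [t], st.2.1, if i = j then st.2.2 ++ [t] else st.2.2)
  let st := (st.1, st.2.1 + 1, st.2.2)
  let p := "packets_" ++ PySem.Int.toStr i ++ "_" ++ PySem.Int.toStr j
  let st := (st.1 ++ [p], st.2.1, if i = j then st.2.2 ++ [p] else st.2.2)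
  let st := (st.1, st.2.1 + 1, st.2.2)
  let d := "drops_" ++ PySem.Int.toStr i ++ "_" ++ PySem.Int.toStr j
  let st := (st.1 ++ [d], st.2.1, if i = j then st.2.2 ++ [d] else st.2.2)
  (st.1, st.2.1 + 1, st.2.2)

-- one inner-loop body of A's second double loop (the k-loop over delayKeys)
def mnStep2 (i j : Int) (st : List String × Int × List String) : List String × Int × List String :=
  delayKeys.foldl (fun st k =>
    let s := k ++ "_delay_" ++ PySem.Int.toStr i ++ "_" ++ PySem.Int.toStr j
    let st := (st.1 ++ [s], st.2.1, if i = j then st.2.2 ++ [s] else st.2.2)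
    (st.1, st.2.1 + 1, st.2.2)) st

def make_names (n : Int) : List String × List String :=
  let st : List String × Int × List String := ([], 0, [])
  let st := (PySem.List.pyRange 0 n 1).foldl (fun st i =>
    (PySem.List.pyRange 0 n 1).foldl (fun st j => mnStep1 i j st) st) st
  let st := (PySem.List.pyRange 0 n 1).foldl (fun st i =>
    (PySem.List.pyRange 0 n 1).foldl (fun st j => mnStep2 i j st) st) st
  (st.1 ++ ["empty"], st.2.2)

-- ===== PORT B =====
def mnBase (i j : Int) : List String :=
  ["traffic_" ++ PySem.Int.toStr i ++ "_" ++ PySem.Int.toStr j,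
   "packets_" ++ PySem.Int.toStr i ++ "_" ++ PySem.Int.toStr j,
   "drops_" ++ PySem.Int.toStr i ++ "_" ++ PySem.Int.toStr j]

def mnDelays (i j : Int) : List String :=
  ["average", "average_log", "q10", "q20", "q50", "q80", "q90", "variance"].map
    (fun k => k ++ "_delay_" ++ PySem.Int.toStr i ++ "_" ++ PySem.Int.toStr j)

def make_names_alt (n : Int) : List String × List String :=
  let r := PySem.List.pyRange 0 n 1
  let names := r.flatMap (fun i => r.flatMap (fun j => mnBase i j))
               ++ r.flatMap (fun i => r.flatMap (fun j => mnDelays i j))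
               ++ ["empty"]
  let drop_names := r.flatMap (fun i => mnBase i i) ++ r.flatMap (fun i => mnDelays i i)
  (names, drop_names)

-- ===== PRECONDITION & SPEC =====
def Spec_make_names (n : Int) (out : List String × List String) : Prop := out = make_names_alt n
instance (n : Int) (out : List String × List String) : Decidable (Spec_make_names n out) := by unfold Spec_make_names; infer_instance

-- ===== CLAIM (what is proved, stated in full; the proofs are below) =====
def Claim_equal_make_names : Prop := ∀ (n : Int), Dom_make_names n → Spec_make_names n (make_names n)

-- ===== LEMMAS AND PROOFS =====

-- a fold whose step appends F x to names, adds K x to the counter and appends G x to drops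
theorem foldl_tri {α : Type} (step : α → (List String × Int × List String) → List String × Int × List String)
    (F G : α → List String) (K : α → Int)
    (h : ∀ x st, step x st = (st.1 ++ F x, st.2.1 + K x, st.2.2 ++ G x)) :
    ∀ (l : List α) (st : List String × Int × List String),
      l.foldl (fun st x => step x st) st
        = (st.1 ++ l.flatMap F, st.2.1 + (l.map K).sum, st.2.2 ++ l.flatMap G) := by
  intro l
  induction l with
  | nil => intro st; simp
  | cons a l ih =>
      intro st
      simp [List.foldl_cons, ih, h a st]
      omega

theorem mnStep1_eq (i j : Int) (st : List String × Int × List String) :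
    mnStep1 i j st = (st.1 ++ mnBase i j, st.2.1 + 3, st.2.2 ++ if i = j then mnBase i j else []) := by
  obtain ⟨a, c, d⟩ := st
  simp only [mnStep1, mnBase]
  split_ifs <;> simp <;> omega

theorem mnStep2_eq (i j : Int) (st : List String × Int × List String) :
    mnStep2 i j st = (st.1 ++ mnDelays i j, st.2.1 + 8, st.2.2 ++ if i = j then mnDelays i j else []) := by
  obtain ⟨a, c, d⟩ := st
  simp only [mnStep2, delayKeys, mnDelays]
  split_ifs <;> simp [List.foldl_cons] <;> omega

-- picking the diagonal out of the j-loop: on a Nodup list containing i, only j = i contributes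
theorem flatMap_ite_diag {g : Int → List String} :
    ∀ (l : List Int), l.Nodup → ∀ i ∈ l, (l.flatMap (fun j => if i = j then g j else [])) = g i := by
  intro l
  induction l with
  | nil => intro _ i hi; simp at hi
  | cons a l ih =>
      intro hnd i hi
      rcases List.nodup_cons.mp hnd with ⟨ha, hnd'⟩
      rcases List.mem_cons.mp hi with h | h
      · subst h
        simp only [List.flatMap_cons]
        have : l.flatMap (fun j => if i = j then g j else []) = [] := by
          rw [List.flatMap_eq_nil_iff]
          intro j hj
          have : i ≠ j := fun e => ha (e ▸ hj)
          simp [this]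
        simp [this]
      · have hia : i ≠ a := fun e => ha (e ▸ h)
        simp [List.flatMap_cons, hia, ih hnd' i h]

theorem phase_eq (F : Int → Int → List String) (c3 : Int)
    (step : Int → Int → (List String × Int × List String) → List String × Int × List String)
    (hstep : ∀ i j st, step i j st = (st.1 ++ F i j, st.2.1 + c3, st.2.2 ++ if i = j then F i j else []))
    (n : Int) (st : List String × Int × List String) :
    (PySem.List.pyRange 0 n 1).foldl (fun st i =>
      (PySem.List.pyRange 0 n 1).foldl (fun st j => step i j st) st) st
    = (st.1 ++ (PySem.List.pyRange 0 n 1).flatMap (fun i => (PySem.List.pyRange 0 n 1).flatMap (F i)),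
       st.2.1 + ((PySem.List.pyRange 0 n 1).map (fun _ => ((PySem.List.pyRange 0 n 1).map (fun _ => c3)).sum)).sum,
       st.2.2 ++ (PySem.List.pyRange 0 n 1).flatMap (fun i => F i i)) := by
  set r := PySem.List.pyRange 0 n 1 with hr
  have hinner : ∀ i st, r.foldl (fun st j => step i j st) st
      = (st.1 ++ r.flatMap (F i), st.2.1 + (r.map (fun _ => c3)).sum,
         st.2.2 ++ r.flatMap (fun j => if i = j then F i j else [])) :=
    fun i st => foldl_tri (step i) (F i) (fun j => if i = j then F i j else []) (fun _ => c3) (hstep i) r st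
  have houter := foldl_tri (fun i st => r.foldl (fun st j => step i j st) st)
      (fun i => r.flatMap (F i))
      (fun i => r.flatMap (fun j => if i = j then F i j else []))
      (fun _ => (r.map (fun _ => c3)).sum) hinner r st
  rw [houter]
  have hdiag : r.flatMap (fun i => r.flatMap (fun j => if i = j then F i j else []))
      = r.flatMap (fun i => F i i) := by
    apply List.flatMap_congr
    intro i hi
    have h1 : r.flatMap (fun j => if i = j then F i j else []) = F i i :=
      flatMap_ite_diag r (hr ▸ PySem.List.nodup_pyRange_one 0 n) i hi
    simpa using h1
  rw [hdiag]

-- ===== VERDICT (by name: the statement is the Claim_ definition above) =====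
theorem make_names_spec : Claim_equal_make_names := by
  intro n _
  unfold Spec_make_names make_names make_names_alt
  simp only []
  rw [phase_eq mnBase 3 mnStep1 mnStep1_eq, phase_eq mnDelays 8 mnStep2 mnStep2_eq]
  simp
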